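-- pv_equiv track=rewrite | github.com/emikoifish/soba | parser.py | findMinRepresentation
-- ===== SOURCE A (Python) =====
-- def findMinRepresentation(ref, seq, ref1Pos, ref2Pos, swapped=False):
--     """
--     Reduce ref and seq sequences into the minimum representation seen in the vcf.
--     """
--     # if len(ref) == len(seq) and swapped is False: #SNP
--     #     return ref[self.k:-self.k], seq[self.k:-self.k], ref1Pos+self.k
--     # else:
--     # thanks: https://www.cureffi.org/2014/04/24/converting-genetic-variants-to-their-minimal-representation/
--     while (min(len(seq), len(ref)) > 1 and seq[-1] == ref[-1]):
--         seq = seq[:-1]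
--         ref = ref[:-1]
--         # strip off identical prefixes and increment position
--     while (min(len(seq), len(ref)) > 1 and seq[0] == ref[0]):
--         seq = seq[1:]
--         ref = ref[1:]
--         ref1Pos += 1
--     return ref, seq, ref1Pos
-- ===== SOURCE B (Python) =====
-- def findMinRepresentation(ref, seq, ref1Pos, ref2Pos, swapped=False):
--     """O(n) re-implementation: count matching suffix/prefix chars, then slice once."""
--     m = min(len(ref), len(seq))
--     k = 0
--     while k < m - 1 and ref[len(ref) - 1 - k] == seq[len(seq) - 1 - k]:
--         k += 1
--     ref = ref[:len(ref) - k]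
--     seq = seq[:len(seq) - k]
--     m -= k
--     p = 0
--     while p < m - 1 and ref[p] == seq[p]:
--         p += 1
--     return ref[p:], seq[p:], ref1Pos + p
-- ===== Notes on version B (the rewrite author's own statement) =====
-- stated objective: faster
-- what changed: replaces A's repeated whole-string re-slicing loops (each iteration copies the strings) by two index-counting scans that find the lengths of the shared suffix and prefix and then slice each string exactly once
import Mathlib
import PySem

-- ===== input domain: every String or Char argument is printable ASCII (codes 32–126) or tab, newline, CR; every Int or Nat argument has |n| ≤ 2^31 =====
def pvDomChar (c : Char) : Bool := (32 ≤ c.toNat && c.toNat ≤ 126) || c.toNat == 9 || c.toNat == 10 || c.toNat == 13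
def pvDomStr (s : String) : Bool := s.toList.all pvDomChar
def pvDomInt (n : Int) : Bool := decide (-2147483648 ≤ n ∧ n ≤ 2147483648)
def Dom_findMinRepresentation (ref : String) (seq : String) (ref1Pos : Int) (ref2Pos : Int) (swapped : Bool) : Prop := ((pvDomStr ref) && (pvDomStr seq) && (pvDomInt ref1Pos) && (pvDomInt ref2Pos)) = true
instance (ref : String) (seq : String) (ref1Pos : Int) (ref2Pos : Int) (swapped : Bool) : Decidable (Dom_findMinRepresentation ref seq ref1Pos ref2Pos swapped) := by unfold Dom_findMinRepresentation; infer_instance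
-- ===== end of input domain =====

-- B replaces A's repeated whole-string re-slicing loops by two counting scans and a single slice of each string (faster).

-- ===== PORT A =====
-- A's first while loop: strip identical last characters while min length > 1
-- (s[-1] is PySem.List.pyGetD s (-1), in range under the guard; s[:-1] is exactly List.dropLast)
def pvTrimTailA (r s : List Char) : List Char × List Char :=
  if _h : 1 < min s.length r.length ∧ PySem.List.pyGetD s (-1) ' ' = PySem.List.pyGetD r (-1) ' ' then
    pvTrimTailA r.dropLast s.dropLast
  else (r, s)
termination_by s.length
decreasing_by simp only [List.length_dropLast]; omega

-- A's second while loop: strip identical first characters, incrementing the position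
-- (s[0] is PySem.List.pyGetD s 0, in range under the guard; s[1:] is exactly List.tail)
def pvTrimHeadA (r s : List Char) (pos : Int) : List Char × List Char × Int :=
  if _h : 1 < min s.length r.length ∧ PySem.List.pyGetD s 0 ' ' = PySem.List.pyGetD r 0 ' ' then
    pvTrimHeadA r.tail s.tail (pos + 1)
  else (r, s, pos)
termination_by s.length
decreasing_by simp only [List.length_tail]; omega

def findMinRepresentation (ref : String) (seq : String) (ref1Pos : Int) (ref2Pos : Int) (swapped : Bool) : String × String × Int :=
  let rs := pvTrimTailA ref.toList seq.toList
  let t := pvTrimHeadA rs.1 rs.2 ref1Pos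
  (String.ofList t.1, String.ofList t.2.1, t.2.2)

-- ===== PORT B =====
-- B's first counting loop: number of shared trailing characters (capped at m-1); indices are in range under the guard
def pvCountTailB (r s : List Char) (m k : Nat) : Nat :=
  if _h : k < m - 1 ∧ r.getD (r.length - 1 - k) ' ' = s.getD (s.length - 1 - k) ' ' then
    pvCountTailB r s m (k + 1)
  else k
termination_by m - k
decreasing_by omega

-- B's second counting loop: number of shared leading characters (capped at m-1)
def pvCountHeadB (r s : List Char) (m p : Nat) : Nat :=
  if _h : p < m - 1 ∧ r.getD p ' ' = s.getD p ' ' then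
    pvCountHeadB r s m (p + 1)
  else p
termination_by m - p
decreasing_by omega

def findMinRepresentation_alt (ref : String) (seq : String) (ref1Pos : Int) (ref2Pos : Int) (swapped : Bool) : String × String × Int :=
  let r := ref.toList
  let s := seq.toList
  let m := min r.length s.length
  let k := pvCountTailB r s m 0
  let r1 := r.take (r.length - k)
  let s1 := s.take (s.length - k)
  let p := pvCountHeadB r1 s1 (m - k) 0
  (String.ofList (r1.drop p), String.ofList (s1.drop p), ref1Pos + (p : Int))

-- ===== PRECONDITION & SPEC =====
def Spec_findMinRepresentation (ref : String) (seq : String) (ref1Pos : Int) (ref2Pos : Int) (swapped : Bool) (out : String × String × Int) : Prop := out = findMinRepresentation_alt ref seq ref1Pos ref2Pos swapped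
instance (ref : String) (seq : String) (ref1Pos : Int) (ref2Pos : Int) (swapped : Bool) (out : String × String × Int) : Decidable (Spec_findMinRepresentation ref seq ref1Pos ref2Pos swapped out) := by unfold Spec_findMinRepresentation; infer_instance

-- ===== CLAIM (what is proved, stated in full; the proofs are below) =====
def Claim_equal_findMinRepresentation : Prop := ∀ (ref : String) (seq : String) (ref1Pos : Int) (ref2Pos : Int) (swapped : Bool), Dom_findMinRepresentation ref seq ref1Pos ref2Pos swapped → Spec_findMinRepresentation ref seq ref1Pos ref2Pos swapped (findMinRepresentation ref seq ref1Pos ref2Pos swapped)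

-- ===== LEMMAS AND PROOFS =====

theorem pvCountTailB_le (r s : List Char) (m k : Nat) (hk : k ≤ m) :
    pvCountTailB r s m k ≤ m := by
  rw [pvCountTailB]
  split
  · exact pvCountTailB_le r s m (k + 1) (by omega)
  · exact hk
termination_by m - k
decreasing_by omega

-- A's tail loop, started on the k-fold-trimmed lists, ends where B's tail count says
theorem tail_agree (r0 s0 : List Char) (k : Nat) (hk : k ≤ min r0.length s0.length) :
    pvTrimTailA (r0.take (r0.length - k)) (s0.take (s0.length - k))
      = (r0.take (r0.length - pvCountTailB r0 s0 (min r0.length s0.length) k),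
         s0.take (s0.length - pvCountTailB r0 s0 (min r0.length s0.length) k)) := by
  rw [pvTrimTailA, pvCountTailB]
  have hklen : k ≤ s0.length ∧ k ≤ r0.length := by omega
  by_cases hnum : k < min r0.length s0.length - 1
  · have hsne : s0.length - k ≥ 2 := by omega
    have hrne : r0.length - k ≥ 2 := by omega
    have es : PySem.List.pyGetD (s0.take (s0.length - k)) (-1) ' ' = s0.getD (s0.length - 1 - k) ' ' := by
      rw [PySem.List.pyGetD_neg_ofNat _ 1 _ (by omega) (by rw [List.length_take]; omega)]
      rw [List.getElem_take, List.getD_eq_getElem _ _ (by omega : s0.length - 1 - k < s0.length)]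
      congr 1
      rw [List.length_take]; omega
    have er : PySem.List.pyGetD (r0.take (r0.length - k)) (-1) ' ' = r0.getD (r0.length - 1 - k) ' ' := by
      rw [PySem.List.pyGetD_neg_ofNat _ 1 _ (by omega) (by rw [List.length_take]; omega)]
      rw [List.getElem_take, List.getD_eq_getElem _ _ (by omega : r0.length - 1 - k < r0.length)]
      congr 1
      rw [List.length_take]; omega
    by_cases hc : r0.getD (r0.length - 1 - k) ' ' = s0.getD (s0.length - 1 - k) ' '
    · rw [dif_pos ⟨by rw [List.length_take, List.length_take]; omega, by rw [es, er, hc]⟩, dif_pos ⟨hnum, hc⟩]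
      have dr : (r0.take (r0.length - k)).dropLast = r0.take (r0.length - (k + 1)) := by
        rw [List.dropLast_eq_take, List.length_take, List.take_take,
          show min (min (r0.length - k) r0.length - 1) (r0.length - k) = r0.length - (k + 1) by omega]
      have ds : (s0.take (s0.length - k)).dropLast = s0.take (s0.length - (k + 1)) := by
        rw [List.dropLast_eq_take, List.length_take, List.take_take,
          show min (min (s0.length - k) s0.length - 1) (s0.length - k) = s0.length - (k + 1) by omega]
      rw [dr, ds]
      exact tail_agree r0 s0 (k + 1) (by omega)
    · rw [dif_neg (by rw [es, er]; exact fun h => hc (h.2.symm)), dif_neg (by exact fun h => hc h.2)]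
  · rw [dif_neg (by rw [List.length_take, List.length_take]; omega), dif_neg (by omega)]
termination_by min r0.length s0.length - k
decreasing_by omega

-- A's head loop, started on the k-fold-dropped lists, ends where B's head count says
theorem head_agree (r0 s0 : List Char) (k : Nat) (pos : Int) (hk : k ≤ min r0.length s0.length) :
    pvTrimHeadA (r0.drop k) (s0.drop k) (pos + (k : Int))
      = (r0.drop (pvCountHeadB r0 s0 (min r0.length s0.length) k),
         s0.drop (pvCountHeadB r0 s0 (min r0.length s0.length) k),
         pos + (pvCountHeadB r0 s0 (min r0.length s0.length) k : Int)) := by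
  rw [pvTrimHeadA, pvCountHeadB]
  have hr : (r0.drop k).length = r0.length - k := List.length_drop ..
  have hs : (s0.drop k).length = s0.length - k := List.length_drop ..
  by_cases hnum : k < min r0.length s0.length - 1
  · have es : PySem.List.pyGetD (s0.drop k) 0 ' ' = s0.getD k ' ' := by
      have hb : 0 < (s0.drop k).length := by rw [List.length_drop]; omega
      rw [PySem.List.pyGetD_zero, List.getD_eq_getElem _ _ hb,
        List.getD_eq_getElem _ _ (by omega : k < s0.length), List.getElem_drop]
      congr 1
    have er : PySem.List.pyGetD (r0.drop k) 0 ' ' = r0.getD k ' ' := by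
      have hb : 0 < (r0.drop k).length := by rw [List.length_drop]; omega
      rw [PySem.List.pyGetD_zero, List.getD_eq_getElem _ _ hb,
        List.getD_eq_getElem _ _ (by omega : k < r0.length), List.getElem_drop]
      congr 1
    by_cases hc : r0.getD k ' ' = s0.getD k ' '
    · rw [dif_pos ⟨by rw [hr, hs]; omega, by rw [es, er, hc]⟩, dif_pos ⟨hnum, hc⟩]
      rw [List.tail_drop, List.tail_drop]
      have : pos + (k : Int) + 1 = pos + ((k + 1 : Nat) : Int) := by push_cast; ring
      rw [this]
      exact head_agree r0 s0 (k + 1) pos (by omega)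
    · rw [dif_neg (by rw [es, er]; exact fun h => hc (h.2.symm)), dif_neg (by exact fun h => hc h.2)]
  · rw [dif_neg (by rw [hr, hs]; omega), dif_neg (by omega)]
termination_by min r0.length s0.length - k
decreasing_by omega

-- ===== VERDICT (by name: the statement is the Claim_ definition above) =====
theorem findMinRepresentation_spec : Claim_equal_findMinRepresentation := by
  intro ref seq ref1Pos ref2Pos swapped _
  unfold Spec_findMinRepresentation findMinRepresentation findMinRepresentation_alt
  set r := ref.toList with hrdef
  set s := seq.toList with hsdef
  set m := min r.length s.length with hm
  set k := pvCountTailB r s m 0 with hkdef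
  have hkle : k ≤ m := pvCountTailB_le r s m 0 (by omega)
  have h0 := tail_agree r s 0 (by omega)
  simp only [Nat.sub_zero, List.take_length, ← hm, ← hkdef] at h0
  set r1 := r.take (r.length - k) with hr1
  set s1 := s.take (s.length - k) with hs1
  have hmin : min r1.length s1.length = m - k := by
    rw [hr1, hs1]; simp [List.length_take]; omega
  have h1 := head_agree r1 s1 0 ref1Pos (by omega)
  simp only [List.drop_zero, Nat.cast_zero, add_zero, hmin] at h1
  simp only [h0, h1]
  rfl
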